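-- pv_equiv track=rewrite | github.com/DmitriyKolomenkin/the_snake | Новая папка/for_project.py | count_max_blocks
-- ===== SOURCE A (Python) =====
-- def count_max_blocks(numbers_list):
--     max_n = numbers_list[0]
--     length = 0
--     q_block = 0
--     for num in numbers_list:
--         length += 1
--         max_n = max(num, max_n)
--         expect_length = max_n + 1
--         if length == expect_length:
--             q_block += 1
--         else:
--             continue
--     return q_block
-- ===== SOURCE B (Python) =====
-- def count_max_blocks(numbers_list):
--     # Left-to-right strict maxima ("records"): the running maximum is constant
--     # between consecutive records, so each record (p, v) with next record at
--     # position q contributes a counted index iff p <= v < q.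
--     records = []
--     for p, v in enumerate(numbers_list):
--         if not records or v > records[-1][1]:
--             records.append((p, v))
--     n = len(numbers_list)
--     bounds = [q for q, _ in records[1:]] + [n]
--     return sum(1 for (p, v), q in zip(records, bounds) if p <= v < q)
-- ===== Notes on version B (the rewrite author's own statement) =====
-- stated objective: alternative
-- what changed: B first extracts the left-to-right strict maxima (records) and then counts one per record segment via the interval test p <= v < next-record-position, instead of A's per-index pass comparing running max+1 with the running length.
-- crash fix: On the empty list A raises IndexError (it reads numbers_list[0]); B naturally returns 0. — e.g. on count_max_blocks([]): A raises IndexError, B returns 0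
import Mathlib
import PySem

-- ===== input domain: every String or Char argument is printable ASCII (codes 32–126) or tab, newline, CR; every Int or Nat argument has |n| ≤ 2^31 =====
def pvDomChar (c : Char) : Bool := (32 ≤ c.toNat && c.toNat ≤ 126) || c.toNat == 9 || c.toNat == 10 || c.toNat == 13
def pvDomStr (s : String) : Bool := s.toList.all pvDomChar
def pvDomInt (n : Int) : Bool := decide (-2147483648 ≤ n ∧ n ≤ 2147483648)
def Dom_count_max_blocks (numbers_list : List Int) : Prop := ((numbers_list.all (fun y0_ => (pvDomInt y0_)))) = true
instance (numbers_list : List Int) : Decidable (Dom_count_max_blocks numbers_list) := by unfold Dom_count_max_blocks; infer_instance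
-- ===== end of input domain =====

-- B extracts the left-to-right strict maxima (records) and counts one per record segment
-- via the interval test p ≤ v < next-record-position; A's per-index pass is ported literally.

-- ===== PORT A =====
def count_max_blocks (numbers_list : List Int) : Int :=
  let max_n := (PySem.List.pyGet? numbers_list 0).getD 0   -- none = IndexError, excluded by Pre_
  let st := numbers_list.foldl (fun (st : Int × Int × Int) num =>
    let length := st.2.1 + 1
    let max_n := max num st.1
    if length = max_n + 1 then (max_n, length, st.2.2 + 1) else (max_n, length, st.2.2))
    (max_n, 0, 0)
  st.2.2

-- ===== PORT B =====
def count_max_blocks_alt (numbers_list : List Int) : Int :=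
  -- records[-1] is only read when records is nonempty (Python's short-circuit `or`),
  -- so getLast?.getD is exact there
  let records := (PySem.List.enumerate numbers_list 0).foldl
    (fun (records : List (Int × Int)) pv =>
      if records.isEmpty ∨ pv.2 > (records.getLast?.getD (0, 0)).2
      then records ++ [pv] else records) []
  let n : Int := numbers_list.length
  let bounds := (records.drop 1).map Prod.fst ++ [n]
  (records.zip bounds).foldl
    (fun acc x => if x.1.1 ≤ x.1.2 ∧ x.1.2 < x.2 then acc + 1 else acc) 0

-- ===== PRECONDITION & SPEC =====
-- Pre_ excludes the empty list, where Python A raises IndexError on numbers_list[0].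
def Pre_count_max_blocks (numbers_list : List Int) : Prop := numbers_list ≠ []
instance (numbers_list : List Int) : Decidable (Pre_count_max_blocks numbers_list) := by unfold Pre_count_max_blocks; infer_instance
def pvWitness_count_max_blocks : List Int := [0, 1, 5, 3]

-- On the empty list A raises IndexError (it reads numbers_list[0]); B naturally returns 0.
def Raises_count_max_blocks (numbers_list : List Int) : Prop := numbers_list = []
instance (numbers_list : List Int) : Decidable (Raises_count_max_blocks numbers_list) := by unfold Raises_count_max_blocks; infer_instance
def pvRaiseWitness_count_max_blocks : List Int := []
def pvRaiseWitnessOut_count_max_blocks : Int := 0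

def Spec_count_max_blocks (numbers_list : List Int) (out : Int) : Prop := out = count_max_blocks_alt numbers_list
instance (numbers_list : List Int) (out : Int) : Decidable (Spec_count_max_blocks numbers_list out) := by unfold Spec_count_max_blocks; infer_instance

-- ===== CLAIM =====
def Claim_equal_count_max_blocks : Prop := ∀ (numbers_list : List Int), Dom_count_max_blocks numbers_list → Pre_count_max_blocks numbers_list → Spec_count_max_blocks numbers_list (count_max_blocks numbers_list)
def Claim_raises_count_max_blocks : Prop := (∀ (numbers_list : List Int), Dom_count_max_blocks numbers_list → Raises_count_max_blocks numbers_list → ¬ Pre_count_max_blocks numbers_list) ∧ (Dom_count_max_blocks (pvRaiseWitness_count_max_blocks) ∧ Raises_count_max_blocks (pvRaiseWitness_count_max_blocks) ∧ count_max_blocks_alt (pvRaiseWitness_count_max_blocks) = pvRaiseWitnessOut_count_max_blocks)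

-- ===== LEMMAS AND PROOFS =====

-- shared one-step running-max update
def pvStep (mo : Option Int) (x : Int) : Int := match mo with | none => x | some m => max m x

-- counting spec: positions (from index s, pending max mo) where the running max equals the index
def pvCnt : List Int → Option Int → Int → Int
  | [], _, _ => 0
  | x :: xs, mo, s => (if pvStep mo x = s then 1 else 0) + pvCnt xs (some (pvStep mo x)) (s + 1)

-- named copies of the ports' loop bodies (definitionally equal to the lambdas)
def pvStepA (st : Int × Int × Int) (num : Int) : Int × Int × Int :=
  let length := st.2.1 + 1
  let max_n := max num st.1
  if length = max_n + 1 then (max_n, length, st.2.2 + 1) else (max_n, length, st.2.2)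

def pvStepR (records : List (Int × Int)) (pv : Int × Int) : List (Int × Int) :=
  if records.isEmpty ∨ pv.2 > (records.getLast?.getD (0, 0)).2
  then records ++ [pv] else records

def pvStepC (acc : Int) (x : (Int × Int) × Int) : Int :=
  if x.1.1 ≤ x.1.2 ∧ x.1.2 < x.2 then acc + 1 else acc

-- the record (strict left-to-right maxima) list, recursively
def pvRecs : List Int → Int → Option Int → List (Int × Int)
  | [], _, _ => []
  | x :: xs, p, none => (p, x) :: pvRecs xs (p + 1) (some x)
  | x :: xs, p, some m =>
      if x > m then (p, x) :: pvRecs xs (p + 1) (some x) else pvRecs xs (p + 1) (some m)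

def pvHeadPos : List (Int × Int) → Int → Int
  | [], n => n
  | (q, _) :: _, _ => q

-- segment count: each record (p, v) contributes 1 iff p ≤ v < next record position (or n)
def pvZ : List (Int × Int) → Int → Int
  | [], _ => 0
  | (p, v) :: rs, n => (if p ≤ v ∧ v < pvHeadPos rs n then 1 else 0) + pvZ rs n

theorem portA_eq (xs : List Int) :
    count_max_blocks xs
      = (xs.foldl pvStepA ((PySem.List.pyGet? xs 0).getD 0, 0, 0)).2.2 := rfl

theorem portB_eq (xs : List Int) :
    count_max_blocks_alt xs
      = (((PySem.List.enumerate xs 0).foldl pvStepR []).zip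
          ((((PySem.List.enumerate xs 0).foldl pvStepR []).drop 1).map Prod.fst
            ++ [(xs.length : Int)])).foldl pvStepC 0 := rfl

theorem foldA_eq (xs : List Int) : ∀ (m len q : Int),
    (xs.foldl pvStepA (m, len, q)).2.2 = q + pvCnt xs (some m) len := by
  induction xs with
  | nil => intro m len q; simp [pvCnt]
  | cons x xs ih =>
    intro m len q
    have hstep : pvStep (some m) x = max x m := by simp [pvStep, max_comm]
    simp only [List.foldl_cons, pvCnt, hstep, pvStepA]
    by_cases h : len + 1 = max x m + 1
    · rw [if_pos h, ih, if_pos (show max x m = len by omega)]; ring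
    · rw [if_neg h, ih, if_neg (show ¬ max x m = len by omega)]; ring

theorem foldR_eq (xs : List Int) : ∀ (p : Int) (acc : List (Int × Int)),
    (PySem.List.enumerate xs p).foldl pvStepR acc
      = acc ++ pvRecs xs p (acc.getLast?.map Prod.snd) := by
  induction xs with
  | nil => intro p acc; simp [PySem.List.enumerate_nil, pvRecs]
  | cons x xs ih =>
    intro p acc
    rw [PySem.List.enumerate_cons, List.foldl_cons, ih]
    rcases acc.eq_nil_or_concat with rfl | ⟨as, a, rfl⟩
    · simp [pvStepR, pvRecs]
    · simp only [List.concat_eq_append]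
      have hlast : (as ++ [a]).getLast? = some a := List.getLast?_concat
      by_cases h : x > a.2
      · have : pvStepR (as ++ [a]) (p, x) = (as ++ [a]) ++ [(p, x)] := by
          simp [pvStepR, hlast, h]
        rw [this]
        simp [hlast, pvRecs, h]
      · have : pvStepR (as ++ [a]) (p, x) = as ++ [a] := by
          simp only [pvStepR, hlast]
          simp [h]
        rw [this, hlast]
        simp [pvRecs, h]

theorem zipfold_eq (rs : List (Int × Int)) : ∀ (n a : Int),
    ((rs.zip ((rs.drop 1).map Prod.fst ++ [n])).foldl pvStepC a) = a + pvZ rs n := by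
  induction rs with
  | nil => intro n a; simp [pvZ]
  | cons pv rs ih =>
    intro n a
    obtain ⟨p, v⟩ := pv
    match rs with
    | [] => simp [pvZ, pvHeadPos, pvStepC]; split_ifs <;> ring
    | (q, w) :: rs' =>
      simp only [List.drop_succ_cons, List.drop_zero, List.map_cons, List.cons_append,
        List.zip_cons_cons, List.foldl_cons]
      simp only [List.drop_succ_cons, List.drop_zero] at ih
      rw [ih]
      simp only [pvZ, pvHeadPos, pvStepC]
      split_ifs <;> ring

theorem headPos_lb (xs : List Int) : ∀ (p : Int) (mo : Option Int),
    p ≤ pvHeadPos (pvRecs xs p mo) (p + xs.length) := by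
  induction xs with
  | nil => intro p mo; simp [pvRecs, pvHeadPos]
  | cons x xs ih =>
    intro p mo
    have hn : p + ((x :: xs).length : Int) = (p + 1) + xs.length := by
      simp; ring
    cases mo with
    | none => simp [pvRecs, pvHeadPos]
    | some m =>
      by_cases h : x > m
      · simp [pvRecs, h, pvHeadPos]
      · rw [show pvRecs (x :: xs) p (some m) = pvRecs xs (p + 1) (some m) by
          simp [pvRecs, h], hn]
        have := ih (p + 1) (some m)
        omega

theorem cnt_eq_Z (xs : List Int) : ∀ (p m : Int),
    pvCnt xs (some m) p
      = (if p ≤ m ∧ m < pvHeadPos (pvRecs xs p (some m)) (p + xs.length) then 1 else 0)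
        + pvZ (pvRecs xs p (some m)) (p + xs.length) := by
  induction xs with
  | nil => intro p m; simp [pvCnt, pvRecs, pvZ, pvHeadPos]
  | cons x xs ih =>
    intro p m
    have hn : p + ((x :: xs).length : Int) = (p + 1) + xs.length := by simp; ring
    by_cases h : x > m
    · have hmax : pvStep (some m) x = x := by simp [pvStep]; omega
      have hrec : pvRecs (x :: xs) p (some m) = (p, x) :: pvRecs xs (p + 1) (some x) := by
        simp [pvRecs, h]
      have hq := headPos_lb xs (p + 1) (some x)
      have hcnt : pvCnt (x :: xs) (some m) p
          = (if x = p then 1 else 0) + pvCnt xs (some x) (p + 1) := by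
        simp only [pvCnt, hmax]
      have hhp : pvHeadPos ((p, x) :: pvRecs xs (p + 1) (some x)) ((p + 1) + (xs.length : Int)) = p := rfl
      have hz : pvZ ((p, x) :: pvRecs xs (p + 1) (some x)) ((p + 1) + (xs.length : Int))
          = (if p ≤ x ∧ x < pvHeadPos (pvRecs xs (p + 1) (some x)) ((p + 1) + (xs.length : Int)) then 1 else 0)
            + pvZ (pvRecs xs (p + 1) (some x)) ((p + 1) + (xs.length : Int)) := rfl
      rw [hcnt, ih, hrec, hn, hhp, hz]
      split_ifs <;> omega
    · have hmax : pvStep (some m) x = m := by simp [pvStep]; omega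
      have hrec : pvRecs (x :: xs) p (some m) = pvRecs xs (p + 1) (some m) := by
        simp [pvRecs, h]
      have hq := headPos_lb xs (p + 1) (some m)
      have hcnt : pvCnt (x :: xs) (some m) p
          = (if m = p then 1 else 0) + pvCnt xs (some m) (p + 1) := by
        simp only [pvCnt, hmax]
      rw [hcnt, ih, hrec, hn]
      split_ifs <;> omega

theorem alt_eq_cnt (xs : List Int) : count_max_blocks_alt xs = pvCnt xs none 0 := by
  rw [portB_eq, foldR_eq]
  simp only [List.nil_append, List.getLast?_nil, Option.map_none]
  rw [zipfold_eq, zero_add]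
  cases xs with
  | nil => simp [pvRecs, pvZ, pvCnt]
  | cons x xs =>
    have hrec : pvRecs (x :: xs) 0 none = (0, x) :: pvRecs xs 1 (some x) := rfl
    have hn : (((x :: xs).length : Int)) = 1 + xs.length := by simp; ring
    have hq := headPos_lb xs 1 (some x)
    have hcnt : pvCnt (x :: xs) none 0 = (if x = 0 then 1 else 0) + pvCnt xs (some x) 1 := by
      simp only [pvCnt, pvStep, zero_add]
      rfl
    have hz : pvZ ((0, x) :: pvRecs xs 1 (some x)) (1 + (xs.length : Int))
        = (if 0 ≤ x ∧ x < pvHeadPos (pvRecs xs 1 (some x)) (1 + (xs.length : Int)) then 1 else 0)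
          + pvZ (pvRecs xs 1 (some x)) (1 + (xs.length : Int)) := rfl
    have hc := cnt_eq_Z xs 1 x
    rw [hrec, hn, hz, hcnt, hc]
    split_ifs <;> omega

-- ===== VERDICT =====
theorem count_max_blocks_spec : Claim_equal_count_max_blocks := by
  intro xs _ hpre
  unfold Spec_count_max_blocks
  rw [alt_eq_cnt]
  match xs, hpre with
  | x :: rest, _ =>
    rw [portA_eq]
    have hg : ((PySem.List.pyGet? (x :: rest) 0).getD 0) = x := by
      simp [PySem.List.pyGet?, PySem.List.pyIdx?]
    rw [hg, List.foldl_cons]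
    have hmx : max x x = x := max_self x
    have hs : pvStep none x = x := rfl
    simp only [pvCnt, hs, pvStepA, hmx]
    by_cases h : (0 : Int) + 1 = x + 1
    · rw [if_pos h, foldA_eq, if_pos (show x = (0 : Int) by omega)]; ring
    · rw [if_neg h, foldA_eq, if_neg (show ¬ x = (0 : Int) by omega)]

@[simp] theorem count_max_blocks_raises : Claim_raises_count_max_blocks := by
  unfold Claim_raises_count_max_blocks
  refine ⟨fun xs _ hr => ?_, by decide⟩
  simp only [Raises_count_max_blocks] at hr
  simp [Pre_count_max_blocks, hr]
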